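-- pv_equiv track=rewrite | github.com/hqwisen/rtos-audsley | project.py | filter_tasks_list
-- ===== SOURCE A (Python) =====
-- def filter_tasks_list(tasks, task_id, includes):
--     """
--     Return a list of tasks filters, by including only the indices from includes.
--     :param tasks: list of tasks
--     :param task_id: task_id to use for the new index
--     :param includes: indices of elements to filter
--     :return: the sub_tasks list with the corresponding sub_task_id of the
--     element with index task_id in tasks.
--     Example: tasks = [A, B, C] includes = [0, 2] task_id = 2 (index of C)
--     will return [A, C], 1 (only the include element and the new index)
--     """
--     sub_tasks, sub_task_id = [], None
--     for i in range(len(tasks)):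
--         if i in includes:
--             sub_tasks.append(tasks[i])
--         if task_id == i:
--             sub_task_id = len(sub_tasks) - 1
--     return sub_tasks, sub_task_id
-- ===== SOURCE B (Python) =====
-- def filter_tasks_list(tasks, task_id, includes):
--     valid = sorted(set(i for i in includes if 0 <= i < len(tasks)))
--     sub_tasks = [tasks[i] for i in valid]
--     if 0 <= task_id < len(tasks):
--         sub_task_id = len([i for i in valid if i <= task_id]) - 1
--     else:
--         sub_task_id = None
--     return sub_tasks, sub_task_id
-- ===== Notes on version B (the rewrite author's own statement) =====
-- stated objective: faster
-- what changed: Replaces A's scan over every task index with an 'i in includes' membership test per step by building valid = sorted(set of in-range includes) once, mapping tasks[i] over it, and computing sub_task_id as a count over that index list.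
import Mathlib
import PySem

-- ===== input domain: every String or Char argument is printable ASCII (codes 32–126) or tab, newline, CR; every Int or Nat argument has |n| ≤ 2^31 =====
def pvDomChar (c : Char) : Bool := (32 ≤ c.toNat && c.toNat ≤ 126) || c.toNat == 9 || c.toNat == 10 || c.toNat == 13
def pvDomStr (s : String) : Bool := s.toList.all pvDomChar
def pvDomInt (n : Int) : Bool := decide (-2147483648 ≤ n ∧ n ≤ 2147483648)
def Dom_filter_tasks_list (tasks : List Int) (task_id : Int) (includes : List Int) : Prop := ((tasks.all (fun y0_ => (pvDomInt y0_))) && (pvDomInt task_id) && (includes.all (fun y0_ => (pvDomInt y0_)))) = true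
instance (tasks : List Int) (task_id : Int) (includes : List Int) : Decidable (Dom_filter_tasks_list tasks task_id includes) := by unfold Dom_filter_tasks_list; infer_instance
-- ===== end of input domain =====

-- B replaces A's scan over all task indices (membership-testing includes at each step) by iterating
-- over the sorted deduplicated in-range include indices directly; objective: idiomatic/alternative.

-- ===== PORT A =====
-- A: one pass over range(len(tasks)), appending tasks[i] when i ∈ includes and recording
-- len(sub_tasks)-1 when i == task_id.  tasks[i] with 0 ≤ i < len is exactly List.getD.
def filter_tasks_list (tasks : List Int) (task_id : Int) (includes : List Int) : List Int × Option Int :=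
  (List.range tasks.length).foldl
    (fun st i =>
      let st1 := if includes.contains ((i : Nat) : Int) then (st.1 ++ [tasks.getD i 0], st.2) else st
      if task_id = ((i : Nat) : Int) then (st1.1, some ((st1.1.length : Int) - 1)) else st1)
    ([], none)

-- ===== PORT B =====
-- B: valid = sorted(set(i for i in includes if 0 <= i < len(tasks))); sub_tasks = [tasks[i] for i in valid];
-- sub_task_id = count of valid indices ≤ task_id, minus one, when task_id is in range.
-- tasks[i] with i known nonnegative and in range is exactly List.getD on i.toNat.
def filter_tasks_list_alt (tasks : List Int) (task_id : Int) (includes : List Int) : List Int × Option Int :=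
  let valid := PySem.List.sorted
    (PySem.Set.ofList (includes.filter (fun i => decide (0 ≤ i ∧ i < (tasks.length : Int)))))
    (fun x => x) false
  let sub_tasks := valid.map (fun i => tasks.getD i.toNat 0)
  let sub_task_id :=
    if 0 ≤ task_id ∧ task_id < (tasks.length : Int) then
      some (((valid.filter (fun i => decide (i ≤ task_id))).length : Int) - 1)
    else none
  (sub_tasks, sub_task_id)

-- ===== PRECONDITION & SPEC =====
def Spec_filter_tasks_list (tasks : List Int) (task_id : Int) (includes : List Int) (out : List Int × Option Int) : Prop := out = filter_tasks_list_alt tasks task_id includes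
instance (tasks : List Int) (task_id : Int) (includes : List Int) (out : List Int × Option Int) : Decidable (Spec_filter_tasks_list tasks task_id includes out) := by unfold Spec_filter_tasks_list; infer_instance

-- ===== CLAIM (what is proved, stated in full; the proofs are below) =====
def Claim_equal_filter_tasks_list : Prop := ∀ (tasks : List Int) (task_id : Int) (includes : List Int), Dom_filter_tasks_list tasks task_id includes → Spec_filter_tasks_list tasks task_id includes (filter_tasks_list tasks task_id includes)

-- ===== LEMMAS AND PROOFS =====

-- the in-range include indices below n, in ascending order (the canonical form both sides reach)
def pvC (includes : List Int) (n : Nat) : List Int :=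
  ((List.range n).map (fun i => ((i : Nat) : Int))).filter (fun x => includes.contains x)

lemma pvC_mem (includes : List Int) (n : Nat) (x : Int) (hx : x ∈ pvC includes n) :
    0 ≤ x ∧ x < (n : Int) := by
  unfold pvC at hx
  simp only [List.mem_filter, List.mem_map, List.mem_range] at hx
  obtain ⟨⟨i, hi, rfl⟩, _⟩ := hx
  exact ⟨Int.natCast_nonneg i, by exact_mod_cast hi⟩

lemma pvC_succ (includes : List Int) (n : Nat) :
    pvC includes (n + 1) =
      pvC includes n ++ (if includes.contains ((n : Nat) : Int) then [((n : Nat) : Int)] else []) := by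
  unfold pvC
  rw [List.range_succ, List.map_append, List.filter_append]
  simp [List.filter]
  split_ifs <;> simp_all

lemma pvC_nodup (includes : List Int) (n : Nat) : (pvC includes n).Nodup := by
  unfold pvC
  exact (List.Nodup.map (fun a b h => by exact_mod_cast h) (List.nodup_range)).filter _

lemma pvC_pairwise (includes : List Int) (n : Nat) :
    List.Pairwise (fun a b : Int => a < b) (pvC includes n) := by
  unfold pvC
  exact ((List.pairwise_lt_range (n := n)).map _ (fun a b h => by exact_mod_cast h)).filter _

lemma valid_eq_pvC (tasks includes : List Int) :
    PySem.List.sorted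
      (PySem.Set.ofList (includes.filter (fun i => decide (0 ≤ i ∧ i < (tasks.length : Int)))))
      (fun x => x) false = pvC includes tasks.length := by
  apply PySem.List.sorted_eq_of_perm_of_pairwise_lt
  · rw [List.perm_ext_iff_of_nodup (pvC_nodup _ _) (PySem.Set.nodup_ofList _)]
    intro x
    simp only [PySem.Set.mem_ofList, List.mem_filter, decide_eq_true_eq]
    constructor
    · intro hx
      have h := pvC_mem includes tasks.length x hx
      unfold pvC at hx
      simp only [List.mem_filter, List.contains_iff_mem] at hx
      exact ⟨hx.2, h⟩
    · rintro ⟨hmem, h0, hlt⟩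
      unfold pvC
      simp only [List.mem_filter, List.mem_map, List.mem_range, List.contains_iff_mem]
      refine ⟨⟨x.toNat, ?_, by omega⟩, hmem⟩
      omega
  · exact pvC_pairwise includes tasks.length

lemma foldA_eq (tasks : List Int) (task_id : Int) (includes : List Int) (n : Nat) :
    (List.range n).foldl
      (fun st i =>
        let st1 := if includes.contains ((i : Nat) : Int) then (st.1 ++ [tasks.getD i 0], st.2) else st
        if task_id = ((i : Nat) : Int) then (st1.1, some ((st1.1.length : Int) - 1)) else st1)
      ([], none) =
    ((pvC includes n).map (fun i => tasks.getD i.toNat 0),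
     if 0 ≤ task_id ∧ task_id < (n : Int) then
       some ((((pvC includes n).filter (fun i => decide (i ≤ task_id))).length : Int) - 1)
     else none) := by
  induction n with
  | zero => simp [pvC]
  | succ n ih =>
    rw [List.range_succ, List.foldl_append, ih, pvC_succ]
    have hfilterC : (pvC includes n).filter (fun i => decide (i ≤ ((n : Nat) : Int))) = pvC includes n :=
      List.filter_eq_self.2 (fun a ha => by
        have := pvC_mem includes n a ha; simp only [decide_eq_true_eq]; omega)
    simp only [List.foldl_cons, List.foldl_nil]
    by_cases hc : ((n : Nat) : Int) ∈ includes <;>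
      by_cases ht : task_id = ((n : Nat) : Int)
    · -- included, task_id = n
      subst ht
      rw [if_pos (show (0 : Int) ≤ ((n : Nat) : Int) ∧ ((n : Nat) : Int) < ((n + 1 : Nat) : Int) by
        constructor <;> omega)]
      simp [hc, hfilterC, List.filter_append]
    · -- included, task_id ≠ n
      have hiff : (0 ≤ task_id ∧ task_id < ((n + 1 : Nat) : Int)) ↔
          (0 ≤ task_id ∧ task_id < ((n : Nat) : Int)) := by
        have : task_id ≠ ((n : Nat) : Int) := ht
        constructor <;> intro h <;> exact ⟨h.1, by omega⟩
      by_cases hr : 0 ≤ task_id ∧ task_id < ((n : Nat) : Int)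
      · rw [if_pos hr, if_pos (hiff.2 hr)]
        have hdec : decide (((n : Nat) : Int) ≤ task_id) = false := by
          simp only [decide_eq_false_iff_not]; omega
        simp [hc, ht, List.filter_append, hdec]
      · rw [if_neg hr, if_neg (fun h => hr (hiff.1 h))]
        simp [hc, ht]
    · -- not included, task_id = n
      subst ht
      rw [if_pos (show (0 : Int) ≤ ((n : Nat) : Int) ∧ ((n : Nat) : Int) < ((n + 1 : Nat) : Int) by
        constructor <;> omega)]
      simp [hc, hfilterC]
    · -- not included, task_id ≠ n
      have hiff : (0 ≤ task_id ∧ task_id < ((n + 1 : Nat) : Int)) ↔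
          (0 ≤ task_id ∧ task_id < ((n : Nat) : Int)) := by
        have : task_id ≠ ((n : Nat) : Int) := ht
        constructor <;> intro h <;> exact ⟨h.1, by omega⟩
      by_cases hr : 0 ≤ task_id ∧ task_id < ((n : Nat) : Int)
      · rw [if_pos hr, if_pos (hiff.2 hr)]
        simp [hc, ht]
      · rw [if_neg hr, if_neg (fun h => hr (hiff.1 h))]
        simp [hc, ht]

-- ===== VERDICT (by name: the statement is the Claim_ definition above) =====
theorem filter_tasks_list_spec : Claim_equal_filter_tasks_list := by
  intro tasks task_id includes _
  show filter_tasks_list tasks task_id includes = filter_tasks_list_alt tasks task_id includes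
  unfold filter_tasks_list filter_tasks_list_alt
  rw [valid_eq_pvC, foldA_eq]
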